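-- pv_equiv track=rewrite | github.com/MrGmo/codeWars-Python | 7kyu/alternate-square-sum.py | alternate_sq_sum
-- ===== SOURCE A (Python) =====
-- def alternate_sq_sum(arr):
--     evens = []
--     odds = []
--     for i in range(len(arr)):
--         if i % 2 != 0:
--             evens.append(arr[i]**2)
--         else:
--             odds.append(arr[i])
--     return sum(evens) + sum(odds)
-- ===== SOURCE B (Python) =====
-- def alternate_sq_sum(arr):
--     total = 0
--     i = 0
--     n = len(arr)
--     while i + 1 < n:
--         total += arr[i] + arr[i + 1] * arr[i + 1]
--         i += 2
--     if i < n: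
--         total += arr[i]
--     return total
-- ===== Notes on version B (the rewrite author's own statement) =====
-- stated objective: alternative
-- what changed: Replaces the index loop with a parity branch and two intermediate lists by a single two-at-a-time pass accumulating element + next-element-squared directly, no lists built and no parity test.
import Mathlib
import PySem

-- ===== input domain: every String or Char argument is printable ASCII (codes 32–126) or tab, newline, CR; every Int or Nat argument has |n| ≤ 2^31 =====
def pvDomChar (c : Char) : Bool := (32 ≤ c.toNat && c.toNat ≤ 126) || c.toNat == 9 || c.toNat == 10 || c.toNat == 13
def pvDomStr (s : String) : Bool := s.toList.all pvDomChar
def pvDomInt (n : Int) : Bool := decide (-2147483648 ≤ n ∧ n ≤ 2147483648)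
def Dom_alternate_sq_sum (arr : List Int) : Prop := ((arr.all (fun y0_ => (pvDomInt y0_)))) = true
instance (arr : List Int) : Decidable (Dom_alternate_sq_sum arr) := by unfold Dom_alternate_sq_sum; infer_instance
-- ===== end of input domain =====

-- B: one two-at-a-time pass accumulating element + next-element-squared; no parity test, no intermediate lists.

-- ===== PORT A =====
-- for-loop over range(len(arr)) building evens/odds, transcribed as index recursion with the same accumulators
def alternate_sq_sum_go (arr : List Int) (evens odds : List Int) (i : Nat) : List Int × List Int :=
  if h : i < arr.length then
    if i % 2 ≠ 0 then alternate_sq_sum_go arr (evens ++ [arr[i] * arr[i]]) odds (i + 1)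
    else alternate_sq_sum_go arr evens (odds ++ [arr[i]]) (i + 1)
  else (evens, odds)
termination_by arr.length - i

def alternate_sq_sum (arr : List Int) : Int :=
  let p := alternate_sq_sum_go arr [] [] 0
  p.1.sum + p.2.sum

-- ===== PORT B =====
-- Source B's while loop walks two elements per step; its state (remaining suffix, running total) is this recursion
def alternate_sq_sum_alt : List Int → Int
  | [] => 0
  | [a] => a
  | a :: b :: t => a + b * b + alternate_sq_sum_alt t

-- ===== PRECONDITION & SPEC =====
def Spec_alternate_sq_sum (arr : List Int) (out : Int) : Prop := out = alternate_sq_sum_alt arr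
instance (arr : List Int) (out : Int) : Decidable (Spec_alternate_sq_sum arr out) := by unfold Spec_alternate_sq_sum; infer_instance

-- ===== CLAIM (what is proved, stated in full; the proofs are below) =====
def Claim_equal_alternate_sq_sum : Prop := ∀ (arr : List Int), Dom_alternate_sq_sum arr → Spec_alternate_sq_sum arr (alternate_sq_sum arr)

-- ===== LEMMAS AND PROOFS =====

-- ===== VERDICT (by name: the statement is the Claim_ definition above) =====
-- parity-indexed sum of a suffix: what the loop still has to add
def pvPar : List Int → Nat → Int
  | [], _ => 0
  | a :: t, i => (if i % 2 ≠ 0 then a * a else a) + pvPar t (i + 1)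

theorem pvGo_sum : ∀ (arr evens odds : List Int) (i : Nat),
    (alternate_sq_sum_go arr evens odds i).1.sum + (alternate_sq_sum_go arr evens odds i).2.sum
      = evens.sum + odds.sum + pvPar (arr.drop i) i := by
  intro arr evens odds i
  induction evens, odds, i using alternate_sq_sum_go.induct arr with
  | case1 evens odds i h hp ih =>
    have hdrop : arr.drop i = arr[i] :: arr.drop (i + 1) := List.drop_eq_getElem_cons h
    rw [alternate_sq_sum_go, dif_pos h, if_pos hp, ih, hdrop, pvPar, if_pos hp]
    simp; ring
  | case2 evens odds i h hp ih =>
    have hdrop : arr.drop i = arr[i] :: arr.drop (i + 1) := List.drop_eq_getElem_cons h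
    rw [alternate_sq_sum_go, dif_pos h, if_neg hp, ih, hdrop, pvPar, if_neg hp]
    simp; ring
  | case3 evens odds i h =>
    have hd : arr.drop i = [] := List.drop_eq_nil_of_le (by omega)
    rw [alternate_sq_sum_go, dif_neg h, hd]
    simp [pvPar]

theorem pvPar_shift : ∀ (t : List Int) (i : Nat), pvPar t (i + 2) = pvPar t i := by
  intro t
  induction t with
  | nil => intro i; simp [pvPar]
  | cons a t ih =>
    intro i
    simp only [pvPar, Nat.add_mod_right]
    rw [show i + 2 + 1 = i + 1 + 2 by ring, ih]

theorem pvPar_eq_alt : ∀ (arr : List Int), pvPar arr 0 = alternate_sq_sum_alt arr := by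
  intro arr
  induction arr using alternate_sq_sum_alt.induct with
  | case1 => simp [pvPar, alternate_sq_sum_alt]
  | case2 a => simp [pvPar, alternate_sq_sum_alt]
  | case3 a b t ih =>
    have h2 : pvPar t (0 + 1 + 1) = pvPar t 0 := pvPar_shift t 0
    simp only [pvPar, alternate_sq_sum_alt, h2, ih]
    norm_num
    ring

theorem alternate_sq_sum_spec : Claim_equal_alternate_sq_sum := by
  intro arr _
  unfold Spec_alternate_sq_sum alternate_sq_sum
  rw [pvGo_sum]
  simp [pvPar_eq_alt]
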